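-- pv_equiv track=rewrite | github.com/maoyalu/leetcode | Python/1200-1299/1207_Unique_Number_of_Occurrences.py | solution
-- ===== SOURCE A (Python) =====
-- def solution(arr):
--
--     # ********** Attempt 2 - 2019/10/31  **********
--
--     num_dict = {}
--     for num in arr:
--         if num in num_dict:
--             num_dict[num] += 1
--         else:
--             num_dict[num] = 1
--     count_dict = {}
--     for num in num_dict:
--         count_dict[num_dict[num]] = num
--     return len(num_dict) == len(count_dict)
-- ===== SOURCE B (Python) =====
-- def solution(arr):
--     counts = {}
--     for num in arr:
--         counts[num] = counts.get(num, 0) + 1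
--     vals = sorted(counts.values())
--     for prev, cur in zip(vals, vals[1:]):
--         if prev == cur:
--             return False
--     return True
-- ===== Notes on version B (the rewrite author's own statement) =====
-- stated objective: alternative
-- what changed: The hash-based uniqueness test (second dict mapping count->num, comparing sizes) is replaced by sorting the counts and scanning once for an equal adjacent pair.
import Mathlib
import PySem

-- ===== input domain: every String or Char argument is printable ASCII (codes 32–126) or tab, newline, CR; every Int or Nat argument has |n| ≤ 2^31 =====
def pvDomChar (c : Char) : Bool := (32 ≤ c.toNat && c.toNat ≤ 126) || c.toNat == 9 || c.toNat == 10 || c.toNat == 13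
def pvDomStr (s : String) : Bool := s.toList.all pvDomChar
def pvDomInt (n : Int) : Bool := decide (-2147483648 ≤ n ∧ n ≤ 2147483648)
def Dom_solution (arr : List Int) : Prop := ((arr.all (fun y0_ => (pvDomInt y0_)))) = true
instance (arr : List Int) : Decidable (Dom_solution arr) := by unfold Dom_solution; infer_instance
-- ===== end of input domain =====

-- B replaces A's second hash map (count -> num, compared by size) with sorting the counts
-- and a single adjacent-duplicate scan: a different uniqueness test of similar cost.


-- ===== PORT A =====
def solution (arr : List Int) : Bool :=
  let numDict : PySem.Dict Int Int :=
    arr.foldl (fun d num =>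
      if d.contains num then d.insert num (d.getD num 0 + 1)
      else d.insert num 1) PySem.Dict.empty
  let countDict : PySem.Dict Int Int :=
    numDict.keys.foldl (fun d num => d.insert (numDict.getD num 0) num) PySem.Dict.empty
  numDict.size == countDict.size

-- ===== PORT B =====
def solution_alt (arr : List Int) : Bool :=
  let counts : PySem.Dict Int Int :=
    arr.foldl (fun d num => d.insert num (d.getD num 0 + 1)) PySem.Dict.empty
  let vals := PySem.List.sorted counts.values (fun v => v) false
  (vals.zip (vals.drop 1)).all (fun p => !(p.1 == p.2))

-- ===== PRECONDITION & SPEC =====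
def Spec_solution (arr : List Int) (out : Bool) : Prop := out = solution_alt arr
instance (arr : List Int) (out : Bool) : Decidable (Spec_solution arr out) := by unfold Spec_solution; infer_instance

-- ===== CLAIM (what is proved, stated in full; the proofs are below) =====
def Claim_equal_solution : Prop := ∀ (arr : List Int), Dom_solution arr → Spec_solution arr (solution arr)

-- ===== LEMMAS AND PROOFS =====

-- the first-occurrence dedup is a sublist of its source
theorem pv_ofList_sublist (l : List Int) : List.Sublist (PySem.Set.ofList l) l := by
  induction l with
  | nil => exact List.Sublist.refl _
  | cons x xs ih =>
    rw [PySem.Set.ofList_cons]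
    exact List.Sublist.cons₂ x (List.Sublist.trans (by simp [PySem.Set.discard]) ih)

-- A's size comparison characterised: it tests Nodup of the count list
theorem pv_length_ofList_eq_iff (l : List Int) :
    (PySem.Set.ofList l).length = l.length ↔ l.Nodup := by
  constructor
  · intro h
    have := (pv_ofList_sublist l).eq_of_length h
    rw [← this]; exact PySem.Set.nodup_ofList l
  · intro h; rw [PySem.Set.ofList_eq_self_of_nodup l h]

-- B's adjacent scan characterised: it tests IsChain (· ≠ ·)
theorem pv_zip_all_ne_iff (s : List Int) :
    ((s.zip (s.drop 1)).all (fun p => !(p.1 == p.2)) = true) ↔ s.IsChain (· ≠ ·) := by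
  induction s with
  | nil => simp
  | cons a t ih => cases t <;> simp_all [List.isChain_cons_cons]

-- on a ≤-sorted list, adjacent distinctness is Nodup
theorem pv_chain_ne_iff_nodup (s : List Int) (hs : s.Pairwise (· ≤ ·)) :
    s.IsChain (· ≠ ·) ↔ s.Nodup := by
  have key : ∀ (t : List Int), t.Pairwise (· ≤ ·) → t.IsChain (· ≠ ·) → t.IsChain (· < ·) := by
    intro t
    induction t with
    | nil => intro _ _; simp
    | cons a u ih =>
      intro hp hc
      cases u with
      | nil => simp
      | cons b v =>
        rw [List.isChain_cons_cons] at hc ⊢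
        exact ⟨lt_of_le_of_ne ((List.pairwise_cons.mp hp).1 b (by simp)) hc.1,
          ih (List.pairwise_cons.mp hp).2 hc.2⟩
  constructor
  · intro hne
    exact (List.isChain_iff_pairwise.mp (key s hs hne)).imp ne_of_lt
  · intro hnd; exact hnd.isChain

-- ===== VERDICT (by name: the statement is the Claim_ definition above) =====
theorem solution_spec : Claim_equal_solution := by
  intro arr _
  unfold Spec_solution solution solution_alt
  -- A's branching counting loop is the counter loop
  have hfun : (fun (d : PySem.Dict Int Int) num =>
      if d.contains num then d.insert num (d.getD num 0 + 1) else d.insert num 1)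
      = (fun d num => d.insert num (d.getD num 0 + 1)) := by
    funext d num
    by_cases h : d.contains num = true
    · simp [h]
    · simp [h, PySem.Dict.getD_of_not_contains d 0 (by simpa using h)]
  rw [hfun, PySem.Dict.foldl_insert_getD_add_one_eq_counter]
  set C := PySem.Dict.counter arr with hC
  have hnd : C.keys.Nodup := PySem.Dict.nodup_keys_counter arr
  -- count_dict's keys are the distinct counts
  have hkeys : (C.keys.foldl (fun d num => d.insert (C.getD num 0) num)
      (PySem.Dict.empty : PySem.Dict Int Int)).keys
      = PySem.Set.ofList (C.keys.map (fun num => C.getD num 0)) := by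
    rw [PySem.Dict.keys_foldl_insert_key]
    rw [show (PySem.Dict.empty : PySem.Dict Int Int).keys = [] from rfl, PySem.Set.update_nil_left]
  have hvals : C.values = C.keys.map (fun k => C.getD k 0) :=
    PySem.Dict.values_eq_map_keys C hnd 0
  -- reduce both sides to Nodup of the count list
  have hsizeA : C.size = C.values.length := by
    simp [PySem.Dict.size, PySem.Dict.values]
  have hsize2 : (C.keys.foldl (fun d num => d.insert (C.getD num 0) num)
      (PySem.Dict.empty : PySem.Dict Int Int)).size
      = (PySem.Set.ofList C.values).length := by
    rw [show (PySem.Dict.size (C.keys.foldl (fun d num => d.insert (C.getD num 0) num)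
      PySem.Dict.empty)) = (C.keys.foldl (fun d num => d.insert (C.getD num 0) num)
      (PySem.Dict.empty : PySem.Dict Int Int)).keys.length from by
        simp [PySem.Dict.size, PySem.Dict.keys], hkeys, hvals]
  rw [Bool.eq_iff_iff]
  simp only [beq_iff_eq, hsizeA, hsize2]
  rw [pv_zip_all_ne_iff, pv_chain_ne_iff_nodup _
    (by simpa using PySem.List.sorted_pairwise C.values (fun v => v)),
    (PySem.List.sorted_perm C.values (fun v => v) false).nodup_iff]
  constructor
  · intro h; exact (pv_length_ofList_eq_iff _).mp h.symm
  · intro h; exact ((pv_length_ofList_eq_iff _).mpr h).symm
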